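-- pv_equiv track=rewrite | github.com/Paul4967/GA-bridge-optimization | del.py | filter_connections
-- ===== SOURCE A (Python) =====
-- def filter_connections(id1, id2, all_connections):
--     removed = False
--     filtered_connections = []
--     for connection in all_connections:
--         if not removed and connection[0] == id1 and connection[1] == id2:
--             removed = True
--             continue  # Skip this connection
--         filtered_connections.append(connection)
--
--     return filtered_connections
-- ===== SOURCE B (Python) =====
-- def filter_connections(id1, id2, all_connections):
--     i = None
--     for k, connection in enumerate(all_connections):
--         if connection[0] == id1 and connection[1] == id2:
--             i = k
--             break
--     if i is None:
--         return list(all_connections)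
--     return list(all_connections[:i]) + list(all_connections[i + 1:])
-- ===== Notes on version B (the rewrite author's own statement) =====
-- stated objective: alternative
-- what changed: Replaces the single filtering loop with a removed-flag by a locate phase (find the index of the first matching pair) followed by a rebuild from two slices.
import Mathlib
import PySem

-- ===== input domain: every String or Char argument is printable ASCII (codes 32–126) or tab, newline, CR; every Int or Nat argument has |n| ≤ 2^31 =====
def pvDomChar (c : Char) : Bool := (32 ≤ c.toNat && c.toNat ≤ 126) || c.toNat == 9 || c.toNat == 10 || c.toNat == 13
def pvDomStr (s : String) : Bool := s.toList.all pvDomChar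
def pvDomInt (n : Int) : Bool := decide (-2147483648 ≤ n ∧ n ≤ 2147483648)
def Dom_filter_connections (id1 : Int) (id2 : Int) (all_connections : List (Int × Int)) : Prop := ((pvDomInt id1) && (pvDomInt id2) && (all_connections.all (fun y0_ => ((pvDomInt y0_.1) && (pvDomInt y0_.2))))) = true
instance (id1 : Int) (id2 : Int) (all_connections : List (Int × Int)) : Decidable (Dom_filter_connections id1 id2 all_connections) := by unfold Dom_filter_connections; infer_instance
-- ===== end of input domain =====

-- B replaces A's single filtering loop with a locate-index phase plus a slice rebuild (objective: alternative decomposition).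
-- ===== PORT A =====
-- literal port of A: one pass with a removed flag and an accumulator (loop body as helper filterStep)
def filterStep (id1 : Int) (id2 : Int) (st : Bool × List (Int × Int)) (connection : Int × Int) : Bool × List (Int × Int) :=
  if !st.1 && connection.1 == id1 && connection.2 == id2 then
    (true, st.2)
  else
    (st.1, st.2 ++ [connection])

def filter_connections (id1 : Int) (id2 : Int) (all_connections : List (Int × Int)) : List (Int × Int) :=
  (all_connections.foldl (filterStep id1 id2) (false, [])).2

-- ===== PORT B =====
-- port of B: locate the first matching index, then rebuild from the two slices
def filter_connections_alt (id1 : Int) (id2 : Int) (all_connections : List (Int × Int)) : List (Int × Int) :=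
  match all_connections.findIdx? (fun c => c.1 == id1 && c.2 == id2) with
  | none => all_connections
  | some i => PySem.List.slice all_connections none (some (Int.ofNat i))
              ++ PySem.List.slice all_connections (some (Int.ofNat i + 1)) none

-- ===== PRECONDITION & SPEC =====
def Spec_filter_connections (id1 : Int) (id2 : Int) (all_connections : List (Int × Int)) (out : List (Int × Int)) : Prop := out = filter_connections_alt id1 id2 all_connections
instance (id1 : Int) (id2 : Int) (all_connections : List (Int × Int)) (out : List (Int × Int)) : Decidable (Spec_filter_connections id1 id2 all_connections out) := by unfold Spec_filter_connections; infer_instance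

-- ===== CLAIM (what is proved, stated in full; the proofs are below) =====
def Claim_equal_filter_connections : Prop := ∀ (id1 : Int) (id2 : Int) (all_connections : List (Int × Int)), Dom_filter_connections id1 id2 all_connections → Spec_filter_connections id1 id2 all_connections (filter_connections id1 id2 all_connections)

-- ===== LEMMAS AND PROOFS =====
theorem filterStep_true (id1 id2 : Int) (acc : List (Int × Int)) (x : Int × Int) :
    filterStep id1 id2 (true, acc) x = (true, acc ++ [x]) := by
  simp [filterStep]

theorem filterStep_false_hit (id1 id2 : Int) (acc : List (Int × Int)) (x : Int × Int)
    (h : (x.1 == id1 && x.2 == id2) = true) :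
    filterStep id1 id2 (false, acc) x = (true, acc) := by
  simp [filterStep, h]

theorem filterStep_false_miss (id1 id2 : Int) (acc : List (Int × Int)) (x : Int × Int)
    (h : (x.1 == id1 && x.2 == id2) = false) :
    filterStep id1 id2 (false, acc) x = (false, acc ++ [x]) := by
  simp only [filterStep, Bool.not_false, Bool.true_and, Bool.and_eq_true] at *
  rw [if_neg (by simp_all)]

theorem foldl_removed (l acc : List (Int × Int)) (id1 id2 : Int) :
    (l.foldl (filterStep id1 id2) (true, acc)).2 = acc ++ l := by
  induction l generalizing acc with
  | nil => simp
  | cons x xs ih => rw [List.foldl_cons, filterStep_true, ih]; simp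

theorem foldl_active (l acc : List (Int × Int)) (id1 id2 : Int) :
    (l.foldl (filterStep id1 id2) (false, acc)).2 =
    acc ++ (match l.findIdx? (fun c => c.1 == id1 && c.2 == id2) with
            | none => l
            | some i => l.take i ++ l.drop (i+1)) := by
  induction l generalizing acc with
  | nil => simp
  | cons x xs ih =>
    rcases h : (x.1 == id1 && x.2 == id2) with _ | _
    · rw [List.foldl_cons, filterStep_false_miss _ _ _ _ h, ih]
      simp only [List.findIdx?_cons, h]
      cases hfi : xs.findIdx? (fun c => c.1 == id1 && c.2 == id2) <;> simp
    · rw [List.foldl_cons, filterStep_false_hit _ _ _ _ h, foldl_removed]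
      simp [List.findIdx?_cons, h]

theorem filter_connections_spec : Claim_equal_filter_connections := by
  intro id1 id2 l _
  unfold Spec_filter_connections filter_connections filter_connections_alt
  rw [foldl_active]
  cases hfi : l.findIdx? (fun c => c.1 == id1 && c.2 == id2) with
  | none => simp
  | some i =>
    have h1 : Int.ofNat i + 1 = ((i + 1 : Nat) : Int) := by simp
    show List.take i l ++ List.drop (i + 1) l
        = PySem.List.slice l none (some (Int.ofNat i))
          ++ PySem.List.slice l (some (Int.ofNat i + 1)) none
    rw [h1, Int.ofNat_eq_natCast, PySem.List.slice_to_natCast, PySem.List.slice_from_natCast]
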